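-- pv_equiv track=rewrite | github.com/nissy-dev/sandbox | deep-learning-lecture/lec-9-task/local_code.py | get_raw_contents
-- ===== SOURCE A (Python) =====
-- def get_raw_contents(dataset, num, bos_id, eos_id):
--     """convert vector to sentence
--
--     Parameters
--     ----------
--     dataset :
--     num :
--     bos_id : 文頭を表す <s> のid
--     eos_id : 文末を表す </s> のid
--     """
--     result = []
--     for index in dataset[num]:
--         if index == eos_id:
--             break
--
--         result.append(index)
--
--         if index == bos_id:
--             result = []
--
--     return result
-- ===== SOURCE B (Python) =====
-- def _take_until(xs, stop):
--     out = []
--     for x in xs: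
--         if x == stop:
--             break
--         out.append(x)
--     return out
--
--
-- def get_raw_contents(dataset, num, bos_id, eos_id):
--     tokens = list(dataset[num])
--     head = _take_until(tokens, eos_id)          # prefix before the first eos
--     return _take_until(reversed(head), bos_id)[::-1]  # suffix after the last bos
-- ===== Notes on version B (the rewrite author's own statement) =====
-- stated objective: simpler
-- what changed: Replaces A's single accumulate-and-reset streaming loop by a boundary decomposition: take the prefix before the first eos, then take (from the right) the suffix after the last bos, reusing one take-until helper twice.
-- outside the precondition, e.g. on get_raw_contents([[1, 2]], 5, 0, 9): A raises IndexError, B raises IndexError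
import Mathlib
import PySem

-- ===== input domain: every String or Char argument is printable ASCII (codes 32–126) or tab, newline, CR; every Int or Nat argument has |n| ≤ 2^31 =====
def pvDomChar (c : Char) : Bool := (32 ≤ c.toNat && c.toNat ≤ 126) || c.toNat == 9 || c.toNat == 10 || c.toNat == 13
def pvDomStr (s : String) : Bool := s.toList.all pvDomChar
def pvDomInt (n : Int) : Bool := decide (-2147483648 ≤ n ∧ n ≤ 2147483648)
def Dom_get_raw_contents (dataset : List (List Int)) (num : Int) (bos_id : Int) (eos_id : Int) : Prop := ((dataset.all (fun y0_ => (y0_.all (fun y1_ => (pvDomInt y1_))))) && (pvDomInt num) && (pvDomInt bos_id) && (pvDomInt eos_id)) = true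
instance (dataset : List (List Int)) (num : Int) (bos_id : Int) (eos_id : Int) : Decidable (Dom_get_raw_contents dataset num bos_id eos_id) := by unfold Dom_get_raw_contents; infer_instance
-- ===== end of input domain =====

-- B is a simpler decomposition of A: one take-until helper applied twice (before first eos,
-- then from the right after the last bos) instead of A's accumulate-and-reset loop.

-- ===== PORT A =====
-- A's for-loop: break on eos, append, reset the accumulator on bos.
def pvLoopA (bos_id eos_id : Int) : List Int → List Int → List Int
  | result, [] => result
  | result, index :: rest =>
    if index = eos_id then result
    else
      let result := result ++ [index]
      if index = bos_id then pvLoopA bos_id eos_id [] rest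
      else pvLoopA bos_id eos_id result rest

def get_raw_contents (dataset : List (List Int)) (num : Int) (bos_id : Int) (eos_id : Int) : List Int :=
  pvLoopA bos_id eos_id [] ((PySem.List.pyGet? dataset num).getD [])

-- ===== PORT B =====
-- _take_until(xs, stop): elements of xs before the first occurrence of stop.
def pvTakeUntil (stop : Int) : List Int → List Int
  | [] => []
  | x :: xs => if x = stop then [] else x :: pvTakeUntil stop xs

def get_raw_contents_alt (dataset : List (List Int)) (num : Int) (bos_id : Int) (eos_id : Int) : List Int :=
  let tokens := (PySem.List.pyGet? dataset num).getD []
  let head := pvTakeUntil eos_id tokens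
  (pvTakeUntil bos_id head.reverse).reverse

-- ===== PRECONDITION & SPEC =====
-- Pre_ excludes exactly the inputs where dataset[num] raises IndexError in Python (both A and B raise there).
def Pre_get_raw_contents (dataset : List (List Int)) (num : Int) (bos_id : Int) (eos_id : Int) : Prop :=
  PySem.Raise.InRange dataset.length num
instance (dataset : List (List Int)) (num : Int) (bos_id : Int) (eos_id : Int) : Decidable (Pre_get_raw_contents dataset num bos_id eos_id) := by unfold Pre_get_raw_contents; infer_instance

def pvWitness_get_raw_contents : List (List Int) × Int × Int × Int := ([[1, 2, 3]], 0, 1, 3)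

def Spec_get_raw_contents (dataset : List (List Int)) (num : Int) (bos_id : Int) (eos_id : Int) (out : List Int) : Prop := out = get_raw_contents_alt dataset num bos_id eos_id
instance (dataset : List (List Int)) (num : Int) (bos_id : Int) (eos_id : Int) (out : List Int) : Decidable (Spec_get_raw_contents dataset num bos_id eos_id out) := by unfold Spec_get_raw_contents; infer_instance

-- ===== CLAIM (what is proved, stated in full; the proofs are below) =====
def Claim_equal_get_raw_contents : Prop := ∀ (dataset : List (List Int)) (num : Int) (bos_id : Int) (eos_id : Int), Dom_get_raw_contents dataset num bos_id eos_id → Pre_get_raw_contents dataset num bos_id eos_id → Spec_get_raw_contents dataset num bos_id eos_id (get_raw_contents dataset num bos_id eos_id)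

-- ===== LEMMAS AND PROOFS =====

theorem pvTakeUntil_append_of_mem (stop : Int) (ys zs : List Int) (h : stop ∈ ys) :
    pvTakeUntil stop (ys ++ zs) = pvTakeUntil stop ys := by
  revert h
  induction ys with
  | nil => intro h; cases h
  | cons y ys ih =>
    intro h
    by_cases hy : y = stop
    · simp [pvTakeUntil, hy]
    · have : stop ∈ ys := by
        rcases List.mem_cons.1 h with h | h
        · exact absurd h.symm hy
        · exact h
      simp [pvTakeUntil, hy, ih this]


theorem pvTakeUntil_append_of_not_mem (stop : Int) (ys zs : List Int) (h : stop ∉ ys) :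
    pvTakeUntil stop (ys ++ zs) = ys ++ pvTakeUntil stop zs := by
  revert h
  induction ys with
  | nil => intro _; simp
  | cons y ys ih =>
    intro h
    have hy : y ≠ stop := fun e => h (by simp [e])
    have hys : stop ∉ ys := fun m => h (by simp [m])
    simp [pvTakeUntil, hy, ih hys]


theorem pvTakeUntil_of_not_mem (stop : Int) (ys : List Int) (h : stop ∉ ys) :
    pvTakeUntil stop ys = ys := by
  revert h
  induction ys with
  | nil => intro _; rfl
  | cons y ys ih =>
    intro h
    have hy : y ≠ stop := fun e => h (by simp [e])
    have hys : stop ∉ ys := fun m => h (by simp [m])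
    simp [pvTakeUntil, hy, ih hys]


-- characterisation of A's loop in terms of B's two take-untils
theorem pvLoopA_eq (bos_id eos_id : Int) : ∀ (l acc : List Int),
    pvLoopA bos_id eos_id acc l =
      if bos_id ∈ pvTakeUntil eos_id l then
        (pvTakeUntil bos_id (pvTakeUntil eos_id l).reverse).reverse
      else acc ++ pvTakeUntil eos_id l := by
  intro l
  induction l with
  | nil => intro acc; simp [pvLoopA, pvTakeUntil]
  | cons x xs ih =>
    intro acc
    by_cases hx : x = eos_id
    · simp [pvLoopA, pvTakeUntil, hx]
    · have hhd : pvTakeUntil eos_id (x :: xs) = x :: pvTakeUntil eos_id xs := by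
        simp [pvTakeUntil, hx]
      set h' := pvTakeUntil eos_id xs with hh'
      by_cases hb : x = bos_id
      · -- reset branch
        subst hb
        have hmem : x ∈ x :: h' := by simp
        rw [show pvLoopA x eos_id acc (x :: xs) = pvLoopA x eos_id [] xs by
              simp [pvLoopA, hx]]
        rw [ih [], hhd, if_pos hmem]
        by_cases hin : x ∈ h'
        · have hinr : x ∈ h'.reverse := by simpa using hin
          rw [if_pos hin]
          simp only [List.reverse_cons]
          rw [pvTakeUntil_append_of_mem _ _ _ hinr]
        · have hinr : x ∉ h'.reverse := by simpa using hin
          rw [if_neg hin]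
          simp only [List.reverse_cons]
          rw [pvTakeUntil_append_of_not_mem _ _ _ hinr]
          simp [pvTakeUntil]
      · -- accumulate branch
        have hstep : pvLoopA bos_id eos_id acc (x :: xs) = pvLoopA bos_id eos_id (acc ++ [x]) xs := by
          simp [pvLoopA, hx, hb]
        rw [hstep, ih (acc ++ [x]), hhd]
        by_cases hin : bos_id ∈ h'
        · have hmem : bos_id ∈ x :: h' := by simp [hin]
          have hinr : bos_id ∈ h'.reverse := by simpa using hin
          rw [if_pos hin, if_pos hmem]
          simp only [List.reverse_cons]
          rw [pvTakeUntil_append_of_mem _ _ _ hinr]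
        · have hmem : bos_id ∉ x :: h' := by
            intro m
            rcases List.mem_cons.1 m with e | m
            · exact hb e.symm
            · exact hin m
          rw [if_neg hin, if_neg hmem]
          simp

theorem pvLoopA_nil (bos_id eos_id : Int) (l : List Int) :
    pvLoopA bos_id eos_id [] l =
      (pvTakeUntil bos_id (pvTakeUntil eos_id l).reverse).reverse := by
  rw [pvLoopA_eq]
  by_cases hin : bos_id ∈ pvTakeUntil eos_id l
  · rw [if_pos hin]
  · have hinr : bos_id ∉ (pvTakeUntil eos_id l).reverse := by simpa using hin
    rw [if_neg hin, pvTakeUntil_of_not_mem _ _ hinr]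
    simp

-- ===== VERDICT (by name: the statement is the Claim_ definition above) =====
theorem get_raw_contents_spec : Claim_equal_get_raw_contents := by
  intro dataset num bos_id eos_id _ _
  unfold Spec_get_raw_contents get_raw_contents get_raw_contents_alt
  exact pvLoopA_nil _ _ _
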